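-- pv_equiv track=rewrite | github.com/Clausius44/ProyectoKatasPython | Ejercicios/Ej29.py | depuratorHastag
-- ===== SOURCE A (Python) =====
-- def depuratorHastag(text):
--
--     hashCount = 4
--     new_text = ""
--
--     for letter in text:
--         if letter == "#" and hashCount > 0:
--             hashCount -= 1
--             continue
--
--         if hashCount < 1:
--             new_text = new_text + letter
--             continue
--
--         else:
--             new_text = new_text + letter
--
--     return new_text
-- ===== SOURCE B (Python) =====
-- def depuratorHastag(text):
--     # idiomatic: bounded replace deletes the first four '#' characters
--     return text.replace("#", "", 4)
-- ===== Notes on version B (the rewrite author's own statement) =====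
-- stated objective: idiomatic
-- what changed: Replaces the stateful character loop with counter by a single bounded str.replace('#','',4) call.
import Mathlib
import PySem

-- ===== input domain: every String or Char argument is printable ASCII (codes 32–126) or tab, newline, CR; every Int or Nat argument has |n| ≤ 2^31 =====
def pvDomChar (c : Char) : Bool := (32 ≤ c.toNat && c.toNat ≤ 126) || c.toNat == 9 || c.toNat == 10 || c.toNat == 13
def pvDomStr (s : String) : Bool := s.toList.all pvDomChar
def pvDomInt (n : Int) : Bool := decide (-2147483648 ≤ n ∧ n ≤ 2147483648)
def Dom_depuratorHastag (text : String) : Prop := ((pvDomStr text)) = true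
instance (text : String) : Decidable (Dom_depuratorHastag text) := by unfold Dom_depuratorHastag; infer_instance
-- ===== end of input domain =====

-- B is the idiomatic one-liner text.replace('#','',4); same value as A on every string.

-- ===== PORT A =====
-- literal transliteration of A's loop: state (hashCount, new_text), chars appended one by one
def depuratorHastag (text : String) : String :=
  let st := text.toList.foldl
    (fun (st : Int × List Char) letter =>
      if letter = '#' ∧ st.1 > 0 then (st.1 - 1, st.2)
      else if st.1 < 1 then (st.1, st.2 ++ [letter])
      else (st.1, st.2 ++ [letter]))
    (4, [])
  String.mk st.2

-- ===== PORT B =====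
-- hand port of str.replace(s, "#", "", 4): exact for a single-char pattern and empty
-- replacement — remove up to `count` occurrences of '#', rest unchanged once count is 0
def pvReplaceHash : Nat → List Char → List Char
  | _, [] => []
  | 0, c :: cs => c :: cs
  | n + 1, c :: cs => if c = '#' then pvReplaceHash n cs else c :: pvReplaceHash (n + 1) cs

def depuratorHastag_alt (text : String) : String :=
  String.mk (pvReplaceHash 4 text.toList)

-- ===== PRECONDITION & SPEC =====
def Spec_depuratorHastag (text : String) (out : String) : Prop := out = depuratorHastag_alt text
instance (text : String) (out : String) : Decidable (Spec_depuratorHastag text out) := by unfold Spec_depuratorHastag; infer_instance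

-- ===== CLAIM (what is proved, stated in full; the proofs are below) =====
def Claim_equal_depuratorHastag : Prop := ∀ (text : String), Dom_depuratorHastag text → Spec_depuratorHastag text (depuratorHastag text)

-- ===== LEMMAS AND PROOFS =====

theorem depuratorHastag_loop (cs : List Char) :
    ∀ (n : Nat) (acc : List Char),
    (cs.foldl
      (fun (st : Int × List Char) letter =>
        if letter = '#' ∧ st.1 > 0 then (st.1 - 1, st.2)
        else if st.1 < 1 then (st.1, st.2 ++ [letter])
        else (st.1, st.2 ++ [letter]))
      ((n : Int), acc)).2 = acc ++ pvReplaceHash n cs := by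
  induction cs with
  | nil => intro n acc; simp [pvReplaceHash]
  | cons c cs ih =>
    intro n acc
    cases n with
    | zero =>
      simp only [List.foldl]
      have h0 : ¬ (c = '#' ∧ ((0 : Nat) : Int) > 0) := by intro h; omega
      rw [if_neg h0, if_pos (by norm_num)]
      have := ih 0 (acc ++ [c])
      simp only [pvReplaceHash] at this ⊢
      rw [this]
      -- pvReplaceHash 0 leaves everything unchanged
      have hrest : pvReplaceHash 0 cs = cs := by
        cases cs <;> simp [pvReplaceHash]
      rw [hrest]; simp
    | succ m =>
      simp only [List.foldl]
      by_cases hc : c = '#'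
      · rw [if_pos ⟨hc, by push_cast; omega⟩]
        have : ((m + 1 : Nat) : Int) - 1 = ((m : Nat) : Int) := by push_cast; omega
        rw [this, ih m acc]
        simp [pvReplaceHash, hc]
      · have hcond : ¬ (c = '#' ∧ ((m + 1 : Nat) : Int) > 0) := by
          intro h; exact hc h.1
        rw [if_neg hcond, if_neg (by push_cast; omega)]
        rw [ih (m + 1) (acc ++ [c])]
        simp [pvReplaceHash, hc]

-- ===== VERDICT (by name: the statement is the Claim_ definition above) =====
theorem depuratorHastag_spec : Claim_equal_depuratorHastag := by
  intro text _
  unfold Spec_depuratorHastag depuratorHastag depuratorHastag_alt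
  have := depuratorHastag_loop text.toList 4 []
  simp only [Nat.cast_ofNat, List.nil_append] at this
  simp only [this]
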